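-- pv_equiv track=rewrite | github.com/tanndlin/AdventOfCode2020 | Day 10/Day10.py | partOne
-- ===== SOURCE A (Python) =====
-- def partOne(arr):
--     ones = 0
--     threes = 1  # Account for last one
--     for i in range(len(arr)-1):
--         if arr[i+1] - arr[i] == 1:
--             ones += 1
--         elif arr[i+1] - arr[i] == 3:
--             threes += 1
--
--     return ones * threes
-- ===== SOURCE B (Python) =====
-- def _tally(arr):
--     # divide and conquer: counts of (1-diffs, 3-diffs) over arr's consecutive pairs
--     n = len(arr)
--     if n < 2:
--         return (0, 0)
--     if n == 2:
--         d = arr[1] - arr[0]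
--         return (1 if d == 1 else 0, 1 if d == 3 else 0)
--     m = n // 2
--     lo, lt = _tally(arr[:m + 1])
--     ro, rt = _tally(arr[m:])
--     return (lo + ro, lt + rt)
--
--
-- def partOne(arr):
--     ones, threes = _tally(arr)
--     return ones * (threes + 1)
-- ===== Notes on version B (the rewrite author's own statement) =====
-- stated objective: alternative
-- what changed: Replaces A's single indexed scan with branch counters by a divide-and-conquer recursion that splits the array at its midpoint (sharing the boundary element), tallies (1-diff, 3-diff) counts in each half, and sums them; the threes seed moves into the final expression.
import Mathlib
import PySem

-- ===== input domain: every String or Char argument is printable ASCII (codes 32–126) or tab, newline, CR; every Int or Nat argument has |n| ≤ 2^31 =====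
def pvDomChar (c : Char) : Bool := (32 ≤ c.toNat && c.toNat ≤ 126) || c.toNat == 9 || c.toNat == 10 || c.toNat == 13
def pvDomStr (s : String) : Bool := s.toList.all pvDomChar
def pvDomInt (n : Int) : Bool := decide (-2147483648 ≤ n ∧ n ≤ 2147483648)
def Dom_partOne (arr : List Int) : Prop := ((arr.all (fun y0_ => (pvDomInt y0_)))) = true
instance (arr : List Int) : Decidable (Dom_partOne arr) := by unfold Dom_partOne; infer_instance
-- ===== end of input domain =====

-- B replaces A's single indexed scan with branch counters by a divide-and-conquer recursion
-- splitting the array at its midpoint (sharing the boundary element) and summing the halves' tallies.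

-- ===== PORT A =====
def partOne (arr : List Int) : Int :=
  let st := (PySem.List.pyRange 0 (PySem.List.len arr - 1) 1).foldl
    (fun (s : Int × Int) i =>
      if PySem.List.pyGetD arr (i + 1) 0 - PySem.List.pyGetD arr i 0 = 1 then (s.1 + 1, s.2)
      else if PySem.List.pyGetD arr (i + 1) 0 - PySem.List.pyGetD arr i 0 = 3 then (s.1, s.2 + 1)
      else s) (0, 1)
  st.1 * st.2

-- ===== PORT B =====
-- _tally: counts of (1-diffs, 3-diffs) over consecutive pairs, by midpoint split
def pvTally (arr : List Int) : Int × Int :=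
  if arr.length < 2 then (0, 0)
  else if arr.length = 2 then
    let d := PySem.List.pyGetD arr 1 0 - PySem.List.pyGetD arr 0 0
    ((if d = 1 then 1 else 0), (if d = 3 then 1 else 0))
  else
    let l := pvTally (PySem.List.slice arr none (some (((arr.length / 2 : Nat) : Int) + 1)))
    let r := pvTally (PySem.List.slice arr (some ((arr.length / 2 : Nat) : Int)) none)
    (l.1 + r.1, l.2 + r.2)
termination_by arr.length
decreasing_by
  · have h : (((arr.length / 2 : Nat) : Int) + 1) = (((arr.length / 2 + 1 : Nat)) : Int) := by
      push_cast; ring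
    rw [h, PySem.List.slice_to_natCast]
    simp only [List.length_take]
    omega
  · rw [PySem.List.slice_from_natCast]
    simp only [List.length_drop]
    omega

def partOne_alt (arr : List Int) : Int :=
  let t := pvTally arr
  t.1 * (t.2 + 1)

-- ===== PRECONDITION & SPEC =====
def Spec_partOne (arr : List Int) (out : Int) : Prop := out = partOne_alt arr
instance (arr : List Int) (out : Int) : Decidable (Spec_partOne arr out) := by unfold Spec_partOne; infer_instance

-- ===== CLAIM (what is proved, stated in full; the proofs are below) =====
def Claim_equal_partOne : Prop := ∀ (arr : List Int), Dom_partOne arr → Spec_partOne arr (partOne arr)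

-- ===== LEMMAS AND PROOFS =====

-- proof-only: the list of consecutive differences
def pyDiffs (arr : List Int) : List Int := (arr.zip arr.tail).map (fun p => p.2 - p.1)

theorem pyDiffs_cons₂ (x y : Int) (t : List Int) :
    pyDiffs (x :: y :: t) = (y - x) :: pyDiffs (y :: t) := by
  simp [pyDiffs]

-- splitting at index m (keeping the boundary element in both halves) splits the diffs
theorem pyDiffs_split (m : Nat) (arr : List Int) (h : m < arr.length) :
    pyDiffs (arr.take (m + 1)) ++ pyDiffs (arr.drop m) = pyDiffs arr := by
  induction m generalizing arr with
  | zero =>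
    cases arr with
    | nil => simp at h
    | cons x xs => simp [pyDiffs]
  | succ m ih =>
    cases arr with
    | nil => simp at h
    | cons x xs =>
      cases xs with
      | nil => simp at h
      | cons y ys =>
        have hm : m < (y :: ys).length := by simp at h ⊢; omega
        have hrec := ih (y :: ys) hm
        simp only [List.take_succ_cons] at hrec
        simp only [List.take_succ_cons, List.drop_succ_cons, pyDiffs_cons₂,
          List.cons_append, hrec]

-- B's recursion computes exactly the counts of 1 and 3 among the consecutive differences
theorem tally_eq (arr : List Int) :
    pvTally arr = (((pyDiffs arr).count 1 : Int), ((pyDiffs arr).count 3 : Int)) := by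
  suffices H : ∀ (n : Nat) (arr : List Int), arr.length ≤ n →
      pvTally arr = (((pyDiffs arr).count 1 : Int), ((pyDiffs arr).count 3 : Int)) from
    H arr.length arr le_rfl
  intro n
  induction n with
  | zero =>
    intro arr hl
    have : arr = [] := List.eq_nil_of_length_eq_zero (Nat.le_zero.mp hl)
    subst this; rw [pvTally]; norm_num [pyDiffs]
  | succ n ih =>
    intro arr hl
    rw [pvTally]
    by_cases hlt : arr.length < 2
    · simp only [hlt, if_true]
      match arr, hlt with
      | [], _ => norm_num [pyDiffs]
      | [x], _ => norm_num [pyDiffs]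
    · by_cases h2 : arr.length = 2
      · simp only [h2, if_true]
        match arr, h2 with
        | [a, b], _ =>
          norm_num [pyDiffs, List.count_cons, PySem.List.pyGetD_ofNat', PySem.List.pyGetD_zero_cons]
      · simp only [hlt, h2, if_false]
        have hm : arr.length / 2 < arr.length := by omega
        have hcast : (((arr.length / 2 : Nat) : Int) + 1) = (((arr.length / 2 + 1 : Nat)) : Int) := by
          push_cast; ring
        rw [hcast, PySem.List.slice_to_natCast, PySem.List.slice_from_natCast]
        have hlenT : (arr.take (arr.length / 2 + 1)).length ≤ n := by
          simp [List.length_take]; omega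
        have hlenD : (arr.drop (arr.length / 2)).length ≤ n := by
          simp [List.length_drop]; omega
        rw [ih _ hlenT, ih _ hlenD]
        rw [← pyDiffs_split (arr.length / 2) arr hm]
        simp only [List.count_append, Prod.mk.injEq]
        constructor <;> push_cast <;> ring

-- A's fold over indices is the same fold over the mapped difference values
theorem foldA_eq_fold_map (arr : List Int) :
    (PySem.List.pyRange 0 (PySem.List.len arr - 1) 1).foldl
      (fun (s : Int × Int) i =>
        if PySem.List.pyGetD arr (i + 1) 0 - PySem.List.pyGetD arr i 0 = 1 then (s.1 + 1, s.2)
        else if PySem.List.pyGetD arr (i + 1) 0 - PySem.List.pyGetD arr i 0 = 3 then (s.1, s.2 + 1)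
        else s) ((0 : Int), (1 : Int))
    = ((PySem.List.pyRange 0 (PySem.List.len arr - 1) 1).map
        (fun i => PySem.List.pyGetD arr (i + 1) 0 - PySem.List.pyGetD arr i 0)).foldl
      (fun (s : Int × Int) d =>
        if d = 1 then (s.1 + 1, s.2)
        else if d = 3 then (s.1, s.2 + 1)
        else s) ((0 : Int), (1 : Int)) := by
  rw [List.foldl_map]

-- the index range mapped through "arr[i+1] - arr[i]" is exactly the difference list
theorem map_pyRange_eq_diffs (arr : List Int) :
    (PySem.List.pyRange 0 (PySem.List.len arr - 1) 1).map
      (fun i => PySem.List.pyGetD arr (i + 1) 0 - PySem.List.pyGetD arr i 0)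
    = pyDiffs arr := by
  cases arr with
  | nil => decide
  | cons x xs =>
    have hlen : PySem.List.len (x :: xs) - 1 = ((xs.length : Nat) : Int) := by
      simp [PySem.List.len_eq]
    rw [hlen, PySem.List.pyRange_zero_natCast, List.map_map]
    apply List.ext_getElem
    · simp [pyDiffs, List.length_zip]
    · intro k h1 h2
      simp only [pyDiffs, List.getElem_map, List.getElem_range, Function.comp_apply,
        List.getElem_zip, List.getElem_tail]
      have hk : k < xs.length := by simpa using h1
      have e1 : ((k : Int) + 1) = (((k + 1 : Nat)) : Int) := by push_cast; ring
      rw [e1, PySem.List.pyGetD_natCast, PySem.List.pyGetD_natCast]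
      have hk1 : k + 1 < (x :: xs).length := by simp; omega
      have hk0 : k < (x :: xs).length := by simp; omega
      rw [List.getD_eq_getElem _ _ hk1, List.getD_eq_getElem _ _ hk0]

-- A's counting fold adds the counts of 1 and 3 to the accumulator
theorem foldl_counts (ds : List Int) (o t : Int) :
    ds.foldl (fun (s : Int × Int) d =>
      if d = 1 then (s.1 + 1, s.2)
      else if d = 3 then (s.1, s.2 + 1)
      else s) (o, t)
    = (o + (ds.count 1 : Int), t + (ds.count 3 : Int)) := by
  induction ds generalizing o t with
  | nil => simp
  | cons d ds ih =>
    by_cases h1 : d = 1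
    · simp [h1, ih]; ring
    · by_cases h3 : d = 3
      · simp [h3, ih]; ring
      · simp [h1, h3, ih]

-- ===== VERDICT (by name: the statement is the Claim_ definition above) =====
theorem partOne_spec : Claim_equal_partOne := by
  intro arr _
  unfold Spec_partOne partOne partOne_alt
  rw [foldA_eq_fold_map arr, map_pyRange_eq_diffs arr, foldl_counts, tally_eq]
  ring
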